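-- pv_equiv track=rewrite | github.com/swooshoo/PokeDexTop | utils/helpers.py | calculate_generation_from_pokedex
-- ===== SOURCE A (Python) =====
-- from typing import List, Optional, Union, Tuple, Any
--
-- def calculate_generation_from_pokedex(pokedex_number: int) -> Optional[int]:
--     """
--     Calculate Pokemon generation from National Pokedex number
--
--     Args:
--         pokedex_number: National Pokedex number
--
--     Returns:
--         Generation number (1-9) or None if invalid
--     """
--     if not pokedex_number or pokedex_number < 1:
--         return None
--
--     generation_ranges = [
--         (1, 151, 1), (152, 251, 2), (252, 386, 3), (387, 493, 4), (494, 649, 5),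
--         (650, 721, 6), (722, 809, 7), (810, 905, 8), (906, 1025, 9)
--     ]
--
--     for start, end, gen in generation_ranges:
--         if start <= pokedex_number <= end:
--             return gen
--
--     return 9  # Default to latest for new Pokemon
-- ===== SOURCE B (Python) =====
-- import bisect
--
-- _GEN_BOUNDS = [151, 251, 386, 493, 649, 721, 809, 905, 1025]
--
-- def calculate_generation_from_pokedex(pokedex_number):
--     if not pokedex_number or pokedex_number < 1:
--         return None
--     return min(bisect.bisect_left(_GEN_BOUNDS, pokedex_number) + 1, 9)
-- ===== Notes on version B (the rewrite author's own statement) =====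
-- stated objective: idiomatic
-- what changed: Replaces the linear scan over nine (start, end, gen) triples with a binary search (bisect_left) over the nine range upper bounds, clamped to generation 9.
import Mathlib
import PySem

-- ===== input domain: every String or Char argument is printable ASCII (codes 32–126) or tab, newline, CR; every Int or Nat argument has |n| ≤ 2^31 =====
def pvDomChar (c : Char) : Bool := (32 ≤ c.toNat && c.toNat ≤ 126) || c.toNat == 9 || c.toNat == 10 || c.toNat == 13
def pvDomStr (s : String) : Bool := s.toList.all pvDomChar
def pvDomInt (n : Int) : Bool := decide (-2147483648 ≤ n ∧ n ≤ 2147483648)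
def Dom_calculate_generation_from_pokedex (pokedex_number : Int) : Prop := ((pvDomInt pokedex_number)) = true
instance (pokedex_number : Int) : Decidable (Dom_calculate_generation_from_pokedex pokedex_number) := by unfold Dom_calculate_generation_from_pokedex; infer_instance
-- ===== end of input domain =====

-- B replaces A's linear scan over (start, end, gen) triples with a binary search
-- (bisect_left) over the nine range upper bounds, clamped to generation 9 (idiomatic).
-- ===== PORT A =====
-- the for-loop over generation_ranges with early return
def pvGenLoop (n : Int) : List (Int × Int × Int) → Option Int
  | [] => none
  | (s, e, g) :: rest => if s ≤ n ∧ n ≤ e then some g else pvGenLoop n rest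

def calculate_generation_from_pokedex (pokedex_number : Int) : Option Int :=
  if pokedex_number = 0 ∨ pokedex_number < 1 then none
  else
    match pvGenLoop pokedex_number
        [(1, 151, 1), (152, 251, 2), (252, 386, 3), (387, 493, 4), (494, 649, 5),
         (650, 721, 6), (722, 809, 7), (810, 905, 8), (906, 1025, 9)] with
    | some g => some g
    | none => some 9

-- ===== PORT B =====
-- bisect.bisect_left(a, x): leftmost index in [lo, hi) where a[idx] >= x
def pvBisectLeft (a : List Int) (x : Int) (lo hi : Nat) : Nat :=
  if lo < hi then
    let mid := (lo + hi) / 2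
    if a.getD mid 0 < x then pvBisectLeft a x (mid + 1) hi
    else pvBisectLeft a x lo mid
  else lo
termination_by hi - lo
decreasing_by all_goals omega

def pvGenBounds : List Int := [151, 251, 386, 493, 649, 721, 809, 905, 1025]

def calculate_generation_from_pokedex_alt (pokedex_number : Int) : Option Int :=
  if pokedex_number = 0 ∨ pokedex_number < 1 then none
  else some (min ((pvBisectLeft pvGenBounds pokedex_number 0 pvGenBounds.length : Int) + 1) 9)

-- ===== PRECONDITION & SPEC =====
def Spec_calculate_generation_from_pokedex (pokedex_number : Int) (out : Option Int) : Prop := out = calculate_generation_from_pokedex_alt pokedex_number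
instance (pokedex_number : Int) (out : Option Int) : Decidable (Spec_calculate_generation_from_pokedex pokedex_number out) := by unfold Spec_calculate_generation_from_pokedex; infer_instance

-- ===== CLAIM (what is proved, stated in full; the proofs are below) =====
def Claim_equal_calculate_generation_from_pokedex : Prop := ∀ (pokedex_number : Int), Dom_calculate_generation_from_pokedex pokedex_number → Spec_calculate_generation_from_pokedex pokedex_number (calculate_generation_from_pokedex pokedex_number)

-- ===== LEMMAS AND PROOFS =====
lemma pvBL_empty (a : List Int) (x : Int) (lo : Nat) : pvBisectLeft a x lo lo = lo := by
  rw [pvBisectLeft, if_neg (by omega)]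

lemma pvBL_8_9 (x : Int) : pvBisectLeft [151, 251, 386, 493, 649, 721, 809, 905, 1025] x 8 9 = (if 1025 < x then 9 else 8) := by
  rw [pvBisectLeft, if_pos (by decide)]
  simp only [Nat.reduceAdd, show ((8+9)/2 : Nat) = 8 from rfl, show ([151, 251, 386, 493, 649, 721, 809, 905, 1025] : List Int).getD 8 0 = 1025 from rfl, pvBL_empty, pvBL_empty]

lemma pvBL_5_6 (x : Int) : pvBisectLeft [151, 251, 386, 493, 649, 721, 809, 905, 1025] x 5 6 = (if 721 < x then 6 else 5) := by
  rw [pvBisectLeft, if_pos (by decide)]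
  simp only [Nat.reduceAdd, show ((5+6)/2 : Nat) = 5 from rfl, show ([151, 251, 386, 493, 649, 721, 809, 905, 1025] : List Int).getD 5 0 = 721 from rfl, pvBL_empty, pvBL_empty]

lemma pvBL_5_7 (x : Int) : pvBisectLeft [151, 251, 386, 493, 649, 721, 809, 905, 1025] x 5 7 = (if 809 < x then 7 else (if 721 < x then 6 else 5)) := by
  rw [pvBisectLeft, if_pos (by decide)]
  simp only [Nat.reduceAdd, show ((5+7)/2 : Nat) = 6 from rfl, show ([151, 251, 386, 493, 649, 721, 809, 905, 1025] : List Int).getD 6 0 = 809 from rfl, pvBL_empty, pvBL_5_6]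

lemma pvBL_5_9 (x : Int) : pvBisectLeft [151, 251, 386, 493, 649, 721, 809, 905, 1025] x 5 9 = (if 905 < x then (if 1025 < x then 9 else 8) else (if 809 < x then 7 else (if 721 < x then 6 else 5))) := by
  rw [pvBisectLeft, if_pos (by decide)]
  simp only [Nat.reduceAdd, show ((5+9)/2 : Nat) = 7 from rfl, show ([151, 251, 386, 493, 649, 721, 809, 905, 1025] : List Int).getD 7 0 = 905 from rfl, pvBL_8_9, pvBL_5_7]

lemma pvBL_3_4 (x : Int) : pvBisectLeft [151, 251, 386, 493, 649, 721, 809, 905, 1025] x 3 4 = (if 493 < x then 4 else 3) := by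
  rw [pvBisectLeft, if_pos (by decide)]
  simp only [Nat.reduceAdd, show ((3+4)/2 : Nat) = 3 from rfl, show ([151, 251, 386, 493, 649, 721, 809, 905, 1025] : List Int).getD 3 0 = 493 from rfl, pvBL_empty, pvBL_empty]

lemma pvBL_0_1 (x : Int) : pvBisectLeft [151, 251, 386, 493, 649, 721, 809, 905, 1025] x 0 1 = (if 151 < x then 1 else 0) := by
  rw [pvBisectLeft, if_pos (by decide)]
  simp only [Nat.reduceAdd, show ((0+1)/2 : Nat) = 0 from rfl, show ([151, 251, 386, 493, 649, 721, 809, 905, 1025] : List Int).getD 0 0 = 151 from rfl, pvBL_empty, pvBL_empty]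

lemma pvBL_0_2 (x : Int) : pvBisectLeft [151, 251, 386, 493, 649, 721, 809, 905, 1025] x 0 2 = (if 251 < x then 2 else (if 151 < x then 1 else 0)) := by
  rw [pvBisectLeft, if_pos (by decide)]
  simp only [Nat.reduceAdd, show ((0+2)/2 : Nat) = 1 from rfl, show ([151, 251, 386, 493, 649, 721, 809, 905, 1025] : List Int).getD 1 0 = 251 from rfl, pvBL_empty, pvBL_0_1]

lemma pvBL_0_4 (x : Int) : pvBisectLeft [151, 251, 386, 493, 649, 721, 809, 905, 1025] x 0 4 = (if 386 < x then (if 493 < x then 4 else 3) else (if 251 < x then 2 else (if 151 < x then 1 else 0))) := by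
  rw [pvBisectLeft, if_pos (by decide)]
  simp only [Nat.reduceAdd, show ((0+4)/2 : Nat) = 2 from rfl, show ([151, 251, 386, 493, 649, 721, 809, 905, 1025] : List Int).getD 2 0 = 386 from rfl, pvBL_3_4, pvBL_0_2]

lemma pvBL_0_9 (x : Int) : pvBisectLeft [151, 251, 386, 493, 649, 721, 809, 905, 1025] x 0 9 = (if 649 < x then (if 905 < x then (if 1025 < x then 9 else 8) else (if 809 < x then 7 else (if 721 < x then 6 else 5))) else (if 386 < x then (if 493 < x then 4 else 3) else (if 251 < x then 2 else (if 151 < x then 1 else 0)))) := by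
  rw [pvBisectLeft, if_pos (by decide)]
  simp only [Nat.reduceAdd, show ((0+9)/2 : Nat) = 4 from rfl, show ([151, 251, 386, 493, 649, 721, 809, 905, 1025] : List Int).getD 4 0 = 649 from rfl, pvBL_5_9, pvBL_0_4]

lemma pvBisectLeft_bounds (x : Int) : pvBisectLeft pvGenBounds x 0 9 = (if 649 < x then (if 905 < x then (if 1025 < x then 9 else 8) else (if 809 < x then 7 else (if 721 < x then 6 else 5))) else (if 386 < x then (if 493 < x then 4 else 3) else (if 251 < x then 2 else (if 151 < x then 1 else 0)))) := by
  unfold pvGenBounds; exact pvBL_0_9 x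

-- ===== VERDICT (by name: the statement is the Claim_ definition above) =====
theorem calculate_generation_from_pokedex_spec : Claim_equal_calculate_generation_from_pokedex := by
  intro n _
  unfold Spec_calculate_generation_from_pokedex
  unfold calculate_generation_from_pokedex calculate_generation_from_pokedex_alt
  by_cases h : n = 0 ∨ n < 1
  · rw [if_pos h, if_pos h]
  · rw [if_neg h, if_neg h]
    rw [show pvGenBounds.length = 9 from rfl, pvBisectLeft_bounds n]
    simp only [pvGenLoop]
    split_ifs <;> first | (exfalso; omega) | rfl
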